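-- pv_equiv track=rewrite | github.com/branislavjenco/advent2020 | day8/solution.py | flip_ins
-- ===== SOURCE A (Python) =====
-- def flip_ins(instruction_list, count):
--     new_list = instruction_list.copy()
--     inner_count = 0
--     for i, (op, arg) in enumerate(instruction_list):
--         if op == "nop" or op == "jmp":
--             if inner_count == count:
--                 if op == "nop":
--                     new_list[i] = ("jmp", arg)
--                 elif op == "jmp":
--                     new_list[i] = ("nop", arg)
--                 break
--             inner_count += 1
--     else:
--         raise AssertionError("shouldnt go through all of the list")
--     return new_list
-- ===== SOURCE B (Python) =====
-- def flip_ins(instruction_list, count):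
--     idxs = [i for i, (op, _) in enumerate(instruction_list) if op == "nop" or op == "jmp"]
--     if not (0 <= count < len(idxs)):
--         raise AssertionError("shouldnt go through all of the list")
--     i = idxs[count]
--     op, arg = instruction_list[i]
--     new_list = list(instruction_list)
--     new_list[i] = ("jmp", arg) if op == "nop" else ("nop", arg)
--     return new_list
-- ===== Notes on version B (the rewrite author's own statement) =====
-- stated objective: simpler
-- what changed: Replaces the single counting loop with break/for-else by first collecting the indices of all nop/jmp instructions, bounds-checking count, and flipping the selected index directly.
import Mathlib
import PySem

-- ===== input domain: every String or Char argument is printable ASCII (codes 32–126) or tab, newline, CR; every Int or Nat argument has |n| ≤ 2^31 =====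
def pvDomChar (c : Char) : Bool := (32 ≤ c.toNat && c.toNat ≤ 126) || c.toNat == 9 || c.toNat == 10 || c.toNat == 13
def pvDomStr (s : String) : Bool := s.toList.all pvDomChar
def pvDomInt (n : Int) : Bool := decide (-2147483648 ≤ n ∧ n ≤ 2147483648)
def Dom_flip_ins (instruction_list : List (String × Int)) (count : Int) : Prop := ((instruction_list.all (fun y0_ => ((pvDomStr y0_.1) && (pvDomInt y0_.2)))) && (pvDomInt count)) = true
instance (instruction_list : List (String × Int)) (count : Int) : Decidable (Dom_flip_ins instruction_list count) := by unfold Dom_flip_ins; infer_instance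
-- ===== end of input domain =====

-- B replaces A's counting loop with break/for-else by an index-list + direct flip (objective: simpler);
-- Pre_ excludes exactly the inputs where A raises AssertionError (count outside the nop/jmp count), where B raises too.


-- ===== PORT A =====
-- A's loop: walk the list with absolute index i and inner_count; at the count-th nop/jmp,
-- assign new_list[i] and break; falling off the end is the for-else raise (= none).
def flipLoopA (rest : List (String × Int)) (i : Nat) (inner_count : Int)
    (new_list : List (String × Int)) (count : Int) : Option (List (String × Int)) :=
  match rest with
  | [] => none  -- for-else: raise AssertionError
  | (op, arg) :: t =>
    if op == "nop" || op == "jmp" then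
      if inner_count == count then
        some (if op == "nop" then new_list.set i ("jmp", arg) else new_list.set i ("nop", arg))
      else flipLoopA t (i + 1) (inner_count + 1) new_list count
    else flipLoopA t (i + 1) inner_count new_list count

def flip_ins (instruction_list : List (String × Int)) (count : Int) : List (String × Int) :=
  (flipLoopA instruction_list 0 0 instruction_list count).getD []

-- ===== PORT B =====
-- the comprehension [i for i,(op,_) in enumerate(l) if op in ...]
def idxsOf : List (String × Int) → Nat → List Nat
  | [], _ => []
  | (op, _) :: t, i => if op == "nop" || op == "jmp" then i :: idxsOf t (i + 1) else idxsOf t (i + 1)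

def flipAltAux (instruction_list : List (String × Int)) (count : Int) : Option (List (String × Int)) :=
  let idxs := idxsOf instruction_list 0
  if 0 ≤ count ∧ count < (idxs.length : Int) then
    match PySem.List.pyGet? idxs count with
    | none => none
    | some i =>
      match PySem.List.pyGet? instruction_list (i : Int) with
      | none => none
      | some (op, arg) =>
        some (instruction_list.set i (if op == "nop" then ("jmp", arg) else ("nop", arg)))
  else none  -- raise AssertionError

def flip_ins_alt (instruction_list : List (String × Int)) (count : Int) : List (String × Int) :=
  (flipAltAux instruction_list count).getD []

-- ===== PRECONDITION & SPEC =====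
-- Pre_ excludes exactly the inputs on which A raises AssertionError: count must index a nop/jmp instruction.
def Pre_flip_ins (instruction_list : List (String × Int)) (count : Int) : Prop :=
  0 ≤ count ∧ count < (instruction_list.countP (fun p => p.1 == "nop" || p.1 == "jmp") : Int)
instance (instruction_list : List (String × Int)) (count : Int) : Decidable (Pre_flip_ins instruction_list count) := by unfold Pre_flip_ins; infer_instance

def pvWitness_flip_ins : (List (String × Int)) × Int := ([("acc", 1), ("nop", 3), ("jmp", -2)], 1)

def Spec_flip_ins (instruction_list : List (String × Int)) (count : Int) (out : List (String × Int)) : Prop := out = flip_ins_alt instruction_list count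
instance (instruction_list : List (String × Int)) (count : Int) (out : List (String × Int)) : Decidable (Spec_flip_ins instruction_list count out) := by unfold Spec_flip_ins; infer_instance

-- ===== CLAIM (what is proved, stated in full; the proofs are below) =====
def Claim_equal_flip_ins : Prop := ∀ (instruction_list : List (String × Int)) (count : Int), Dom_flip_ins instruction_list count → Pre_flip_ins instruction_list count → Spec_flip_ins instruction_list count (flip_ins instruction_list count)

-- ===== LEMMAS AND PROOFS =====

-- the count-th nop/jmp of a list: relative index plus the instruction found there
def findK : List (String × Int) → Int → Option (Nat × String × Int)
  | [], _ => none
  | (op, arg) :: t, k =>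
    if op == "nop" || op == "jmp" then
      if k == 0 then some (0, op, arg)
      else (findK t (k - 1)).map (fun x => (x.1 + 1, x.2))
    else (findK t k).map (fun x => (x.1 + 1, x.2))

theorem flipLoopA_eq (rest : List (String × Int)) (i : Nat) (inner : Int)
    (newl : List (String × Int)) (count : Int) :
    flipLoopA rest i inner newl count =
      (findK rest (count - inner)).map
        (fun x => newl.set (i + x.1)
          (if x.2.1 == "nop" then ("jmp", x.2.2) else ("nop", x.2.2))) := by
  induction rest generalizing i inner with
  | nil => simp [flipLoopA, findK]
  | cons h t ih =>
    obtain ⟨op, arg⟩ := h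
    simp only [flipLoopA, findK]
    by_cases hop : (op == "nop" || op == "jmp") = true
    · simp only [hop, if_true]
      by_cases hk : inner = count
      · subst hk
        simp only [beq_self_eq_true, if_true, sub_self, Option.map_some]
        split <;> rfl
      · have hk' : (count - inner == 0) = false := by
          simp only [beq_eq_false_iff_ne]; omega
        have hk'' : (inner == count) = false := by simp [hk]
        simp only [hk', hk'', Bool.false_eq_true, if_false]
        rw [ih (i + 1) (inner + 1)]
        have he : count - (inner + 1) = count - inner - 1 := by ring
        rw [he, Option.map_map]
        congr 1
        funext x
        simp only [Function.comp]
        congr 1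
        omega
    · simp only [hop, Bool.false_eq_true, if_false]
      rw [ih (i + 1) inner, Option.map_map]
      congr 1
      funext x
      simp only [Function.comp]
      congr 1
      omega

theorem idxsOf_get? (l : List (String × Int)) (i : Nat) (k : Nat) :
    (idxsOf l i)[k]? = (findK l (k : Int)).map (fun x => i + x.1) := by
  induction l generalizing i k with
  | nil => simp [idxsOf, findK]
  | cons h t ih =>
    obtain ⟨op, arg⟩ := h
    simp only [idxsOf, findK]
    by_cases hop : (op == "nop" || op == "jmp") = true
    · simp only [hop, if_true]
      cases k with
      | zero => simp
      | succ k' =>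
        have hk : ((((k' : Nat) + 1 : Nat) : Int) == 0) = false := by
          simp only [beq_eq_false_iff_ne]; omega
        have he : (((k' + 1 : Nat) : Int) - 1) = (k' : Int) := by push_cast; ring
        simp only [hk, Bool.false_eq_true, if_false, he]
        rw [List.getElem?_cons_succ, ih (i + 1) k', Option.map_map]
        congr 1
        funext x
        simp only [Function.comp]
        omega
    · simp only [hop, Bool.false_eq_true, if_false]
      rw [ih (i + 1) k, Option.map_map]
      congr 1
      funext x
      simp only [Function.comp]
      omega

theorem findK_get (l : List (String × Int)) (k : Int) (j : Nat) (op : String) (arg : Int)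
    (h : findK l k = some (j, op, arg)) : l[j]? = some (op, arg) := by
  induction l generalizing k j with
  | nil => simp [findK] at h
  | cons hd t ih =>
    obtain ⟨o, a⟩ := hd
    simp only [findK] at h
    by_cases hop : (o == "nop" || o == "jmp") = true
    · simp only [hop, if_true] at h
      by_cases hk : (k == 0) = true
      · simp only [hk, if_true, Option.some_inj, Prod.mk.injEq] at h
        obtain ⟨h1, h2, h3⟩ := h
        subst h1; subst h2; subst h3
        simp
      · simp only [hk, Bool.false_eq_true, if_false] at h
        cases hfk : findK t (k - 1) with
        | none => rw [hfk] at h; simp at h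
        | some x =>
          obtain ⟨x1, x2, x3⟩ := x
          rw [hfk] at h
          simp only [Option.map_some, Option.some_inj, Prod.mk.injEq] at h
          obtain ⟨h1, h2, h3⟩ := h
          subst h1; subst h2; subst h3
          simpa using ih (k - 1) x1 hfk
    · simp only [hop, Bool.false_eq_true, if_false] at h
      cases hfk : findK t k with
      | none => rw [hfk] at h; simp at h
      | some x =>
        obtain ⟨x1, x2, x3⟩ := x
        rw [hfk] at h
        simp only [Option.map_some, Option.some_inj, Prod.mk.injEq] at h
        obtain ⟨h1, h2, h3⟩ := h
        subst h1; subst h2; subst h3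
        simpa using ih k x1 hfk

theorem idxsOf_length (l : List (String × Int)) (i : Nat) :
    (idxsOf l i).length = l.countP (fun p => p.1 == "nop" || p.1 == "jmp") := by
  induction l generalizing i with
  | nil => simp [idxsOf]
  | cons h t ih =>
    obtain ⟨op, arg⟩ := h
    simp only [idxsOf, List.countP_cons]
    by_cases hop : (op == "nop" || op == "jmp") = true
    · simp [hop, ih]
    · simp [hop, ih]

-- ===== VERDICT (by name: the statement is the Claim_ definition above) =====
theorem flip_ins_spec : Claim_equal_flip_ins := by
  intro l count _ hpre
  obtain ⟨h0, hlt⟩ := hpre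
  unfold Spec_flip_ins flip_ins flip_ins_alt flipAltAux
  rw [flipLoopA_eq]
  have hlen : (idxsOf l 0).length = l.countP (fun p => p.1 == "nop" || p.1 == "jmp") :=
    idxsOf_length l 0
  have hif : (0 ≤ count ∧ count < ((idxsOf l 0).length : Int)) := by
    refine ⟨h0, ?_⟩; rw [hlen]; exact hlt
  rw [if_pos hif]
  have hget : PySem.List.pyGet? (idxsOf l 0) count = (idxsOf l 0)[count.toNat]? :=
    PySem.List.pyGet?_of_nonneg _ h0
  have hcast2 : ((count.toNat : Nat) : Int) = count := by omega
  rw [hget, idxsOf_get? l 0 count.toNat, hcast2]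
  cases hfk : findK l count with
  | none =>
    exfalso
    have hrange : count.toNat < (idxsOf l 0).length := by rw [hlen]; omega
    have hnone : (idxsOf l 0)[count.toNat]? = none := by
      rw [idxsOf_get? l 0 count.toNat, hcast2, hfk]; rfl
    rw [List.getElem?_eq_getElem hrange] at hnone
    simp at hnone
  | some x =>
    obtain ⟨j, op, arg⟩ := x
    simp only [sub_zero, hfk, Option.map_some, Option.getD_some, Nat.zero_add]
    have hgetl : l[j]? = some (op, arg) := findK_get l count j op arg hfk
    have hpg : PySem.List.pyGet? l ((j : Nat) : Int) = some (op, arg) := by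
      rw [PySem.List.pyGet?_natCast]; exact hgetl
    rw [hpg]
    rfl
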